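-- pv_equiv track=rewrite | github.com/Mr-Monster-0248/Graph-theory | graphUtils.py | getLatestDate
-- ===== SOURCE A (Python) =====
-- def getLatestDate(valueMatrix, ranks, maxDate) -> list:
--     """Function that compute the earliest date for every vertices"""
--     latestDate = [0] * len(ranks)
--     latestDate[-1] = maxDate
--     for rank in range(max(ranks) -1, 0, -1):
--         for rankId in range(1, len(ranks)):
--             if (ranks[rankId] == rank):
--                 earlDateVertice = getLatestDatePred(
--                     rankId, valueMatrix, latestDate)
--                 latestDate[rankId] = earlDateVertice
--     return latestDate
--
-- def getLatestDatePred(vertice, valueMatrix, latestDate):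
--     successors = getSuccessorId(vertice, valueMatrix)
--     listAllSuccDate = []
--     for i in successors:
--         listAllSuccDate.append(latestDate[i] - valueMatrix[vertice][i])
--     return min(listAllSuccDate)
--
-- def getSuccessorId(vertice, valueMatrix):
--     succ = []
--     for i in range(len(valueMatrix[vertice])):
--         if (valueMatrix[vertice][i] != None):
--             succ.append(i)
--     return succ
-- ===== SOURCE B (Python) =====
-- def getLatestDate(valueMatrix, ranks, maxDate) -> list:
--     """Sort-then-scan: order the vertices once by (descending rank, ascending id)
--     and update each exactly once, instead of rescanning all vertices for every rank."""
--     n = len(ranks)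
--     latestDate = [0] * n
--     latestDate[-1] = maxDate
--     top = max(ranks)
--     pending = [v for v in range(1, n) if 0 < ranks[v] < top]
--     pending.sort(key=lambda v: (top - ranks[v]) * n + v)
--     for v in pending:
--         latestDate[v] = min(latestDate[i] - w
--                             for i, w in enumerate(valueMatrix[v])
--                             if w is not None)
--     return latestDate
-- ===== Notes on version B (the rewrite author's own statement) =====
-- stated objective: alternative
-- what changed: Replaces A's rescan of all vertices for every rank value in range(max(ranks)-1,0,-1) by building the processing order once: filter the affected vertices, sort them by (descending rank, ascending id), then update each in one scan.
import Mathlib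
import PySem

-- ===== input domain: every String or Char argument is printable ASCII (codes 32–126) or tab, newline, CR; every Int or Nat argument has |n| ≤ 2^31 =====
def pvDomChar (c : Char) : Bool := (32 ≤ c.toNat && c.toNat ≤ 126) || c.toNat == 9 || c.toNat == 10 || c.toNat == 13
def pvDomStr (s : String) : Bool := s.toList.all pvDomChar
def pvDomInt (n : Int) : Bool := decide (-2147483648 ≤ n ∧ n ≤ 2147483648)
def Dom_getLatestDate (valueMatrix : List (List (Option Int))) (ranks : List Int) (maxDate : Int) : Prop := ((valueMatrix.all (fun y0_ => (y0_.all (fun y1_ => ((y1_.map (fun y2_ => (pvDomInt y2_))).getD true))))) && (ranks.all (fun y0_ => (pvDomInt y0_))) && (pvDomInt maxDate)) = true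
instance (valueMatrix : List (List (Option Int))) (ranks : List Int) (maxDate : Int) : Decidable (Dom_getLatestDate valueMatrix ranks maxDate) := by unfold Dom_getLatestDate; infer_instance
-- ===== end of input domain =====

-- B replaces A's rescan of all vertices for every rank value by one sort of the
-- affected vertices by (descending rank, ascending id) and a single scan over them;
-- the return values agree on Pre_.

-- ===== PORT A =====
def getSuccessorId (vertice : Int) (valueMatrix : List (List (Option Int))) : List Int :=
  (PySem.List.pyRange 0 ((PySem.List.pyGetD valueMatrix vertice []).length) 1).foldl
    (fun succ i =>
      if PySem.List.pyGetD (PySem.List.pyGetD valueMatrix vertice []) i none ≠ none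
      then succ ++ [i] else succ) []

def getLatestDatePred (vertice : Int) (valueMatrix : List (List (Option Int))) (latestDate : List Int) : Int :=
  let successors := getSuccessorId vertice valueMatrix
  let listAllSuccDate := successors.foldl
    (fun acc i => acc ++ [PySem.List.pyGetD latestDate i 0 -
        (PySem.List.pyGetD (PySem.List.pyGetD valueMatrix vertice []) i none).getD 0]) []
  -- min(listAllSuccDate): the ValueError on [] is excluded by Pre_
  (PySem.List.min? listAllSuccDate (fun x => x)).getD 0

def getLatestDate (valueMatrix : List (List (Option Int))) (ranks : List Int) (maxDate : Int) : List Int :=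
  let n := ranks.length
  -- latestDate[-1] = maxDate: exact for n ≥ 1 (Pre_ excludes ranks = [], where Python raises IndexError)
  let latestDate := (List.replicate n (0 : Int)).set (n - 1) maxDate
  let top := (PySem.List.max? ranks (fun x => x)).getD 0
  (PySem.List.pyRange (top - 1) 0 (-1)).foldl (fun latestDate rank =>
    (PySem.List.pyRange 1 (n : Int) 1).foldl (fun latestDate rankId =>
      if PySem.List.pyGetD ranks rankId 0 = rank then
        -- latestDate[rankId] = …: rankId ≥ 1, so .toNat is exact
        latestDate.set rankId.toNat (getLatestDatePred rankId valueMatrix latestDate)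
      else latestDate) latestDate) latestDate

-- ===== PORT B =====
-- min(latestDate[i] - w for i, w in enumerate(valueMatrix[v]) if w is not None)
def altVertexDate (valueMatrix : List (List (Option Int))) (latestDate : List Int) (v : Int) : Int :=
  (PySem.List.min?
    (((PySem.List.enumerate (PySem.List.pyGetD valueMatrix v [])).filter
        (fun p => p.2 ≠ none)).map
      (fun p => PySem.List.pyGetD latestDate p.1 0 - p.2.getD 0))
    (fun x => x)).getD 0

def getLatestDate_alt (valueMatrix : List (List (Option Int))) (ranks : List Int) (maxDate : Int) : List Int :=
  let n := ranks.length
  let latestDate := (List.replicate n (0 : Int)).set (n - 1) maxDate   -- latestDate[-1] = maxDate (n ≥ 1 by Pre_)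
  let top := (PySem.List.max? ranks (fun x => x)).getD 0
  let pending := (PySem.List.pyRange 1 (n : Int) 1).filter
    (fun v => 0 < PySem.List.pyGetD ranks v 0 ∧ PySem.List.pyGetD ranks v 0 < top)
  let order := PySem.List.sorted pending
    (fun v => (top - PySem.List.pyGetD ranks v 0) * (n : Int) + v) false
  order.foldl (fun latestDate v =>
    latestDate.set v.toNat (altVertexDate valueMatrix latestDate v)) latestDate

-- ===== PRECONDITION & SPEC =====
-- Pre_ excludes exactly the inputs where Python A raises: empty ranks (IndexError on
-- latestDate[-1]), and any processed vertex (id ≥ 1, 0 < rank < max(ranks)) whose row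
-- is missing (IndexError), has no successor (ValueError: min of an empty list) or has
-- a successor index reaching outside latestDate (IndexError).
def Pre_getLatestDate (valueMatrix : List (List (Option Int))) (ranks : List Int) (maxDate : Int) : Prop :=
  ranks ≠ [] ∧
  ∀ v ∈ List.range ranks.length, 1 ≤ v →
    (0 < ranks.getD v 0 ∧ ∃ r ∈ ranks, ranks.getD v 0 < r) →
    (v < valueMatrix.length ∧
      ((valueMatrix.getD v []).any (fun w => w.isSome)) ∧
      ∀ i ∈ List.range (valueMatrix.getD v []).length,
        ((valueMatrix.getD v []).getD i none).isSome → i < ranks.length)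
instance (valueMatrix : List (List (Option Int))) (ranks : List Int) (maxDate : Int) : Decidable (Pre_getLatestDate valueMatrix ranks maxDate) := by unfold Pre_getLatestDate; infer_instance

def pvWitness_getLatestDate : List (List (Option Int)) × List Int × Int :=
  ([[none, none, none], [none, none, some 3], [none, none, none]], [0, 1, 2], 10)

def Spec_getLatestDate (valueMatrix : List (List (Option Int))) (ranks : List Int) (maxDate : Int) (out : List Int) : Prop := out = getLatestDate_alt valueMatrix ranks maxDate
instance (valueMatrix : List (List (Option Int))) (ranks : List Int) (maxDate : Int) (out : List Int) : Decidable (Spec_getLatestDate valueMatrix ranks maxDate out) := by unfold Spec_getLatestDate; infer_instance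

-- ===== CLAIM (what is proved, stated in full; the proofs are below) =====
def Claim_equal_getLatestDate : Prop := ∀ (valueMatrix : List (List (Option Int))) (ranks : List Int) (maxDate : Int), Dom_getLatestDate valueMatrix ranks maxDate → Pre_getLatestDate valueMatrix ranks maxDate → Spec_getLatestDate valueMatrix ranks maxDate (getLatestDate valueMatrix ranks maxDate)

-- ===== LEMMAS AND PROOFS =====

-- A's per-vertex date equals B's per-vertex date, for every state L and vertex v
theorem pred_eq_altVertexDate (valueMatrix : List (List (Option Int))) (L : List Int) (v : Int) :
    getLatestDatePred v valueMatrix L = altVertexDate valueMatrix L v := by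
  dsimp only [getLatestDatePred, getSuccessorId, altVertexDate]
  rw [PySem.List.enumerate_eq_map_pyRange _ none, List.filter_map, List.map_map]
  rw [PySem.List.foldl_append_ite_eq_filter
    (fun i => PySem.List.pyGetD (PySem.List.pyGetD valueMatrix v []) i none ≠ none)]
  rw [PySem.List.foldl_append_singleton_eq_map
    (fun i => PySem.List.pyGetD L i 0 -
      (PySem.List.pyGetD (PySem.List.pyGetD valueMatrix v []) i none).getD 0)]
  simp [Function.comp_def]

-- disjoint filters: filter p ++ filter q is a permutation of filter (p || q)
theorem filter_or_perm {α : Type} (p q : α → Bool) (xs : List α)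
    (h : ∀ x, ¬(p x = true ∧ q x = true)) :
    (xs.filter p ++ xs.filter q).Perm (xs.filter (fun x => p x || q x)) := by
  induction xs with
  | nil => simp
  | cons a l ih =>
    by_cases hp : p a = true
    · have hq : ¬ q a = true := fun hq => h a ⟨hp, hq⟩
      simpa [hp, hq] using ih.cons a
    · by_cases hq : q a = true
      · rw [List.filter_cons, List.filter_cons, List.filter_cons,
            if_neg hp, if_pos hq, if_pos (by simp [hq])]
        exact (List.perm_middle).trans (ih.cons a)
      · simpa [hp, hq] using ih

-- grouping a filtered list by a nodup key list is a permutation of one filter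
theorem flatMap_filter_perm (k : Int → Int) (xs : List Int) (R : List Int) (hR : R.Nodup) :
    (R.flatMap (fun r => xs.filter (fun v => decide (k v = r)))).Perm
      (xs.filter (fun v => decide (k v ∈ R))) := by
  induction R with
  | nil => simp
  | cons r R ih =>
    have hr : r ∉ R := (List.nodup_cons.mp hR).1
    have ih' := ih (List.nodup_cons.mp hR).2
    have step := filter_or_perm (fun v => decide (k v = r)) (fun v => decide (k v ∈ R)) xs
      (by intro x ⟨h1, h2⟩
          simp only [decide_eq_true_eq] at h1 h2
          exact hr (h1 ▸ h2))
    have h0 : (List.flatMap (fun r => xs.filter (fun v => decide (k v = r))) (r :: R))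
        = xs.filter (fun v => decide (k v = r)) ++
            R.flatMap (fun r => xs.filter (fun v => decide (k v = r))) := by simp
    have hlast : xs.filter (fun v => decide (k v = r) || decide (k v ∈ R))
        = xs.filter (fun v => decide (k v ∈ r :: R)) :=
      List.filter_congr (by intro x _; simp)
    rw [h0, ← hlast]
    exact (ih'.append_left _).trans step

-- the countdown rank list has no duplicates
theorem nodup_countdown (a b : Int) : (PySem.List.pyRange a b (-1)).Nodup := by
  rw [PySem.List.pyRange_neg_one_eq_reverse]
  exact List.nodup_reverse.mpr (PySem.List.nodup_pyRange_one _ _)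

-- A's nested loop = one fold over the rank-grouped vertex order
theorem foldA_eq_foldC (valueMatrix : List (List (Option Int))) (ranks : List Int)
    (L0 : List Int) (n top : Int) :
    (PySem.List.pyRange (top - 1) 0 (-1)).foldl (fun latestDate rank =>
      (PySem.List.pyRange 1 n 1).foldl (fun latestDate rankId =>
        if PySem.List.pyGetD ranks rankId 0 = rank then
          latestDate.set rankId.toNat (getLatestDatePred rankId valueMatrix latestDate)
        else latestDate) latestDate) L0
    = ((PySem.List.pyRange (top - 1) 0 (-1)).flatMap (fun r =>
        (PySem.List.pyRange 1 n 1).filter (fun v => decide (PySem.List.pyGetD ranks v 0 = r)))).foldl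
        (fun L v => L.set v.toNat (getLatestDatePred v valueMatrix L)) L0 := by
  rw [List.foldl_flatMap]
  have hinner : (fun (L : List Int) (r : Int) =>
      (PySem.List.pyRange 1 n 1).foldl (fun latestDate rankId =>
        if PySem.List.pyGetD ranks rankId 0 = r then
          latestDate.set rankId.toNat (getLatestDatePred rankId valueMatrix latestDate)
        else latestDate) L)
      = fun (L : List Int) (r : Int) =>
        ((PySem.List.pyRange 1 n 1).filter (fun v => decide (PySem.List.pyGetD ranks v 0 = r))).foldl
          (fun L v => L.set v.toNat (getLatestDatePred v valueMatrix L)) L := by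
    funext L r
    rw [List.foldl_filter]
    have hf : (fun (a : List Int) (x : Int) =>
        if decide (PySem.List.pyGetD ranks x 0 = r) = true then
          a.set x.toNat (getLatestDatePred x valueMatrix a) else a)
        = fun (a : List Int) (x : Int) =>
          if PySem.List.pyGetD ranks x 0 = r then
            a.set x.toNat (getLatestDatePred x valueMatrix a) else a := by
      funext a x
      by_cases h : PySem.List.pyGetD ranks x 0 = r <;> simp [h]
    rw [hf]
  rw [hinner]

-- the grouped order is strictly increasing under B's composite sort key
theorem pairwise_key_C (ranks : List Int) (n top : Int) :
    List.Pairwise (fun a b =>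
        (top - PySem.List.pyGetD ranks a 0) * n + a < (top - PySem.List.pyGetD ranks b 0) * n + b)
      ((PySem.List.pyRange (top - 1) 0 (-1)).flatMap (fun r =>
        (PySem.List.pyRange 1 n 1).filter (fun v => decide (PySem.List.pyGetD ranks v 0 = r)))) := by
  rw [List.flatMap_def, List.pairwise_flatten]
  constructor
  · intro l' hl'
    obtain ⟨r, hr, rfl⟩ := List.mem_map.mp hl'
    refine ((PySem.List.pairwise_lt_pyRange_one 1 n).filter _).imp_of_mem ?_
    intro a b ha hb hab
    have ha' := (List.mem_filter.mp ha).2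
    have hb' := (List.mem_filter.mp hb).2
    simp only [decide_eq_true_eq] at ha' hb'
    rw [ha', hb']
    omega
  · rw [List.pairwise_map]
    have hdesc : List.Pairwise (fun x y => y < x) (PySem.List.pyRange (top - 1) 0 (-1)) := by
      rw [PySem.List.pyRange_neg_one_eq_reverse, List.pairwise_reverse]
      exact PySem.List.pairwise_lt_pyRange_one _ _
    refine hdesc.imp ?_
    intro r r' hrr' a ha b hb
    obtain ⟨ha1, ha2⟩ := List.mem_filter.mp ha
    obtain ⟨hb1, hb2⟩ := List.mem_filter.mp hb
    simp only [decide_eq_true_eq] at ha2 hb2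
    obtain ⟨ha3, ha4⟩ := PySem.List.mem_pyRange_one.mp ha1
    obtain ⟨hb3, hb4⟩ := PySem.List.mem_pyRange_one.mp hb1
    rw [ha2, hb2]
    nlinarith [mul_le_mul_of_nonneg_right (by omega : r - r' ≥ 1) (by omega : (0:Int) ≤ n)]

-- B's sorted pending list IS the order A processes vertices in
theorem sorted_order_eq (ranks : List Int) (n top : Int) :
    PySem.List.sorted
      ((PySem.List.pyRange 1 n 1).filter
        (fun v => decide (0 < PySem.List.pyGetD ranks v 0 ∧ PySem.List.pyGetD ranks v 0 < top)))
      (fun v => (top - PySem.List.pyGetD ranks v 0) * n + v) false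
    = (PySem.List.pyRange (top - 1) 0 (-1)).flatMap (fun r =>
        (PySem.List.pyRange 1 n 1).filter (fun v => decide (PySem.List.pyGetD ranks v 0 = r))) := by
  apply PySem.List.sorted_eq_of_perm_of_pairwise_lt
  · have hperm := flatMap_filter_perm (fun v => PySem.List.pyGetD ranks v 0)
      (PySem.List.pyRange 1 n 1) (PySem.List.pyRange (top - 1) 0 (-1)) (nodup_countdown _ _)
    have heq : (PySem.List.pyRange 1 n 1).filter
        (fun v => decide (PySem.List.pyGetD ranks v 0 ∈ PySem.List.pyRange (top - 1) 0 (-1)))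
        = (PySem.List.pyRange 1 n 1).filter
          (fun v => decide (0 < PySem.List.pyGetD ranks v 0 ∧ PySem.List.pyGetD ranks v 0 < top)) :=
      List.filter_congr (by
        intro x _
        simp only [decide_eq_decide, PySem.List.mem_pyRange_neg_one]
        omega)
    exact hperm.trans (heq ▸ List.Perm.refl _)
  · exact pairwise_key_C ranks n top

-- ===== VERDICT (by name: the statement is the Claim_ definition above) =====
theorem getLatestDate_spec : Claim_equal_getLatestDate := by
  intro valueMatrix ranks maxDate _ _
  unfold Spec_getLatestDate
  dsimp only [getLatestDate, getLatestDate_alt]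
  rw [foldA_eq_foldC valueMatrix ranks _ (ranks.length : Int), sorted_order_eq]
  have hstep : (fun (L : List Int) (v : Int) => L.set v.toNat (getLatestDatePred v valueMatrix L))
      = fun (L : List Int) (v : Int) => L.set v.toNat (altVertexDate valueMatrix L v) := by
    funext L v
    rw [pred_eq_altVertexDate]
  rw [hstep]
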